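-- pv_equiv track=rewrite | github.com/NHSDigital/eps-spine-shared | src/eps_spine_shared/nhsfundamentals/checksum_util.py | calculateChecksum
-- ===== SOURCE A (Python) =====
-- from string import ascii_uppercase
--
-- def calculateChecksum(prescriptionID):
--     """
--     Generate a checksum for either R1 or R2 prescription
--     """
--     prscID = prescriptionID.replace("-", "")
--     prscIDLength = len(prscID)
--
--     runningTotal = 0
--     for stringPosition in range(prscIDLength - 1):
--         _charMod36 = int(prscID[stringPosition], 36)
--         runningTotal += _charMod36 * (2 ** (prscIDLength - stringPosition - 1))
--
--     checkValue = (38 - runningTotal % 37) % 37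
--     if checkValue == 36:
--         checkValue = "+"
--     elif checkValue > 9:
--         checkValue = ascii_uppercase[checkValue - 10]
--     else:
--         checkValue = str(checkValue)
--
--     return checkValue
-- ===== SOURCE B (Python) =====
-- def calculateChecksum(prescriptionID):
--     """
--     Generate a checksum for either R1 or R2 prescription
--     """
--     s = prescriptionID.replace("-", "")
--     total = 0
--     for ch in s[:-1]:
--         total = (total + int(ch, 36)) * 2 % 37
--     return "0123456789ABCDEFGHIJKLMNOPQRSTUVWXYZ+"[(38 - total) % 37]
-- ===== Notes on version B (the rewrite author's own statement) =====
-- stated objective: faster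
-- what changed: Replaces the big-integer sum of per-position powers 2**(L-pos-1) with a single left-to-right Horner pass that keeps the running total reduced mod 37 (total = (total+digit)*2 % 37), and replaces the final if/elif branch chain with one lookup into a 37-character table of the check characters.
import Mathlib
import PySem

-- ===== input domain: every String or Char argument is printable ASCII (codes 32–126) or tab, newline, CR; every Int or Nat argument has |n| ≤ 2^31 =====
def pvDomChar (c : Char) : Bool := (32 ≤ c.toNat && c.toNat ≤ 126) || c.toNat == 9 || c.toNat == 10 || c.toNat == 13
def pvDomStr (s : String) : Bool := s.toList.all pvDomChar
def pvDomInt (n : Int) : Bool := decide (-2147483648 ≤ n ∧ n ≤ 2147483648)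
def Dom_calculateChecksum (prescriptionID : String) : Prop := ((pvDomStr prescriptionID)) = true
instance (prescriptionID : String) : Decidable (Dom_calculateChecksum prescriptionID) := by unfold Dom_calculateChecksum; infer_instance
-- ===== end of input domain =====

-- B replaces A's bignum sum of powers 2^(L-pos-1) by a Horner pass kept reduced mod 37,
-- and the final branch chain by one table lookup (measured asymptotically faster).

-- shared helper: int(ch, 36) on a one-character string; the default 0 is never reached
-- under Pre_ (Python raises ValueError exactly where ofCharsBase? is none)
def pvDigit (c : Char) : Int := (PySem.Int.ofCharsBase? [c] 36).getD 0

-- string.ascii_uppercase, as its code-point list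
def pvUppercase : List Char := ['A','B','C','D','E','F','G','H','I','J','K','L','M','N','O','P','Q','R','S','T','U','V','W','X','Y','Z']

-- ===== PORT A =====
def calculateChecksum (prescriptionID : String) : String :=
  let prscID := (PySem.Str.replace prescriptionID "-" "").toList
  let prscIDLength : Int := prscID.length
  let runningTotal : Int := (PySem.List.pyRange 0 (prscIDLength - 1) 1).foldl
    (fun rt pos => rt + pvDigit (PySem.List.pyGetD prscID pos ' ') * 2 ^ ((prscIDLength - pos - 1).toNat)) 0
  let checkValue : Int := PySem.Int.mod (38 - PySem.Int.mod runningTotal 37) 37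
  if checkValue == 36 then "+"
  else if checkValue > 9 then String.ofList [PySem.List.pyGetD pvUppercase (checkValue - 10) ' ']
  else PySem.Int.toStr checkValue

-- B's lookup table "0123456789ABCDEFGHIJKLMNOPQRSTUVWXYZ+", as its code-point list
def pvTable : List Char := ['0','1','2','3','4','5','6','7','8','9','A','B','C','D','E','F','G','H','I','J','K','L','M','N','O','P','Q','R','S','T','U','V','W','X','Y','Z','+']

-- ===== PORT B =====
def calculateChecksum_alt (prescriptionID : String) : String :=
  let s := (PySem.Str.replace prescriptionID "-" "").toList
  let total : Int := (PySem.List.slice s none (some (-1))).foldl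
    (fun t c => PySem.Int.mod ((t + pvDigit c) * 2) 37) 0
  String.ofList [PySem.List.pyGetD pvTable (PySem.Int.mod (38 - total) 37) ' ']

-- ===== PRECONDITION & SPEC =====
-- Pre_ excludes exactly the inputs where Python A raises ValueError: some scanned character
-- (all but the last of the id with '-' removed) is not a base-36 digit (ASCII alphanumeric).
def Pre_calculateChecksum (prescriptionID : String) : Prop :=
  ((PySem.Str.replace prescriptionID "-" "").toList.dropLast.all (fun c => c.isAlphanum)) = true
instance (prescriptionID : String) : Decidable (Pre_calculateChecksum prescriptionID) := by
  unfold Pre_calculateChecksum; infer_instance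
def pvWitness_calculateChecksum : String := "83C17E-A2B4F8-5D7C9Z"

def Spec_calculateChecksum (prescriptionID : String) (out : String) : Prop := out = calculateChecksum_alt prescriptionID
instance (prescriptionID : String) (out : String) : Decidable (Spec_calculateChecksum prescriptionID out) := by unfold Spec_calculateChecksum; infer_instance

-- ===== CLAIM (what is proved, stated in full; the proofs are below) =====
def Claim_equal_calculateChecksum : Prop := ∀ (prescriptionID : String), Dom_calculateChecksum prescriptionID → Pre_calculateChecksum prescriptionID → Spec_calculateChecksum prescriptionID (calculateChecksum prescriptionID)

-- ===== LEMMAS AND PROOFS =====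

theorem pv_mul_emod_37 (a b : Int) : ((a % 37) * b) % 37 = (a * b) % 37 := by
  conv_lhs => rw [Int.mul_emod]
  rw [Int.emod_emod_of_dvd _ dvd_rfl, ← Int.mul_emod]

-- invariant of B's Horner loop against A's power-sum loop, after m of the scanned characters
theorem pv_inv (u : List Char) (z : Char) (m : Nat) (hm : m ≤ u.length) :
    0 ≤ (u.take m).foldl (fun t c => PySem.Int.mod ((t + pvDigit c) * 2) 37) 0 ∧
    (u.take m).foldl (fun t c => PySem.Int.mod ((t + pvDigit c) * 2) 37) 0 < 37 ∧
    ((u.take m).foldl (fun t c => PySem.Int.mod ((t + pvDigit c) * 2) 37) 0 * 2 ^ (u.length - m)) % 37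
      = ((PySem.List.pyRange 0 (m : Int) 1).foldl
          (fun rt pos => rt + pvDigit (PySem.List.pyGetD (u ++ [z]) pos ' ')
            * 2 ^ ((((u ++ [z]).length : Int) - pos - 1).toNat)) 0) % 37 := by
  induction m with
  | zero =>
      simp [PySem.List.pyRange_one_eq_nil (le_refl (0 : Int))]
  | succ m ih =>
      obtain ⟨ih0, ih1, ih2⟩ := ih (by omega)
      have hmn : m < u.length := by omega
      have hmod : ∀ a : Int, PySem.Int.mod a 37 = a % 37 :=
        fun _ => PySem.Int.mod_eq_emod_of_pos (by omega)
      have hA : PySem.List.pyRange 0 ((m : Int) + 1) 1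
          = PySem.List.pyRange 0 (m : Int) 1 ++ [(m : Int)] :=
        PySem.List.pyRange_one_succ_right (by positivity)
      have hB : u.take (m + 1) = u.take m ++ [u[m]] := by
        rw [List.take_add_one, List.getElem?_eq_getElem hmn]; rfl
      have hget : PySem.List.pyGetD (u ++ [z]) (m : Int) ' ' = u[m] := by
        rw [PySem.List.pyGetD_natCast, List.getD_eq_getElem?_getD,
            List.getElem?_append_left hmn, List.getElem?_eq_getElem hmn]
        rfl
      have hlen : (((u ++ [z]).length : Int) - (m : Int) - 1).toNat = u.length - m := by
        simp [List.length_append]; omega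
      simp only [hmod] at ih0 ih1 ih2 ⊢
      push_cast
      simp only [hA, hB, List.foldl_append, List.foldl_cons, List.foldl_nil, hget, hlen]
      refine ⟨Int.emod_nonneg _ (by omega), Int.emod_lt_of_pos _ (by omega), ?_⟩
      have hexp : u.length - m = (u.length - (m + 1)) + 1 := by omega
      rw [hexp] at ih2 ⊢
      rw [pv_mul_emod_37]
      have h3 : ((u.take m).foldl (fun t c => (t + pvDigit c) * 2 % 37) 0 + pvDigit u[m]) * 2
            * 2 ^ (u.length - (m + 1))
          = (u.take m).foldl (fun t c => (t + pvDigit c) * 2 % 37) 0 * 2 ^ ((u.length - (m + 1)) + 1)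
            + pvDigit u[m] * 2 ^ ((u.length - (m + 1)) + 1) := by
        rw [pow_succ]; ring
      rw [h3, Int.add_emod, ih2, ← Int.add_emod]

-- A's branch chain agrees with B's table lookup for every check value 0 ≤ c < 37
set_option maxHeartbeats 1000000 in
theorem pv_branch (c : Int) (h0 : 0 ≤ c) (h1 : c < 37) :
    (if c == 36 then "+"
     else if c > 9 then String.ofList [PySem.List.pyGetD pvUppercase (c - 10) ' ']
     else PySem.Int.toStr c)
    = String.ofList [PySem.List.pyGetD pvTable c ' '] := by
  interval_cases c <;> decide

theorem calculateChecksum_eq (p : String) :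
    calculateChecksum p = calculateChecksum_alt p := by
  unfold calculateChecksum calculateChecksum_alt
  rcases List.eq_nil_or_concat ((PySem.Str.replace p "-" "").toList) with hs | ⟨u, z, hs⟩
  · rw [hs]
    decide
  · rw [List.concat_eq_append] at hs
    rw [hs]
    have hmod : ∀ a : Int, PySem.Int.mod a 37 = a % 37 :=
      fun _ => PySem.Int.mod_eq_emod_of_pos (by omega)
    have hlen1 : ((u ++ [z]).length : Int) - 1 = ((u.length : Nat) : Int) := by
      simp [List.length_append]
    have hdrop : (u ++ [z]).dropLast = u := by simp
    obtain ⟨h0, h1, h2⟩ := pv_inv u z u.length le_rfl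
    rw [List.take_length] at h0 h1 h2
    simp only [Nat.sub_self, pow_zero, mul_one] at h2
    simp only [hmod] at h0 h1 h2
    simp only [PySem.List.slice_to_neg_one, hdrop, hlen1, hmod]
    rw [← h2, Int.emod_eq_of_lt h0 h1]
    exact pv_branch _ (Int.emod_nonneg _ (by omega)) (Int.emod_lt_of_pos _ (by omega))

-- ===== VERDICT (by name: the statement is the Claim_ definition above) =====
theorem calculateChecksum_spec : Claim_equal_calculateChecksum := by
  intro p _ _
  unfold Spec_calculateChecksum
  exact calculateChecksum_eq p
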